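-- pv_equiv track=rewrite | github.com/Stramer1/AdventOfCode | 2019/04.py | valid1
-- ===== SOURCE A (Python) =====
-- def valid1(number):
-- 	double = False
-- 	decreases = False
-- 	for i in range(1, len(number)):
-- 		if number[i] == number[i-1]:
-- 			double = True
-- 		if number[i - 1] > number[i]:
-- 			decreases = True
-- 	return double and not decreases
-- ===== SOURCE B (Python) =====
-- def valid1(number):
--     non_decreasing = all(a <= b for a, b in zip(number, number[1:]))
--     has_dup = len(set(number)) != len(number)
--     return non_decreasing and has_dup
-- ===== Notes on version B (the rewrite author's own statement) =====
-- stated objective: simpler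
-- what changed: Replaces the single index loop with two flags by a zip-based all() for the ordering check and a set-cardinality test for the duplicate check, relying on the fact that in a non-decreasing string any duplicate character is adjacent.
import Mathlib
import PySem

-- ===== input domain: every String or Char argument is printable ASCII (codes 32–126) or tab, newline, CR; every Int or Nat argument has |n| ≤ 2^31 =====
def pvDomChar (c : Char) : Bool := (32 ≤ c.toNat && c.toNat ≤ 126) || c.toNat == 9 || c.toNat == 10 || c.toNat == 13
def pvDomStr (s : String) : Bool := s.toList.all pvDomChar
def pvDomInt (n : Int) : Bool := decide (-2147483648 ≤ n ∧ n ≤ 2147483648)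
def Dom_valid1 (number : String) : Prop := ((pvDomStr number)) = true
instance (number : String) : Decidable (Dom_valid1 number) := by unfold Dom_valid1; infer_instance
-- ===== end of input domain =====

-- B replaces A's one loop with two flags by a separate non-decreasing check and a
-- set-cardinality duplicate test (in a non-decreasing string any duplicate is adjacent); simpler, same cost.

-- ===== PORT A =====
-- the loop 'for i in range(1, len(number))' compares number[i] with number[i-1]:
-- ported as structural recursion carrying the previous character and the two flags
def valid1Loop : Char → List Char → Bool → Bool → Bool × Bool
  | _, [], double, decreases => (double, decreases)
  | prev, c :: rest, double, decreases =>
      valid1Loop c rest (if c == prev then true else double)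
        (if decide (prev > c) then true else decreases)

def valid1 (number : String) : Bool :=
  match number.toList with
  | [] => false && !false
  | c :: rest =>
      let st := valid1Loop c rest false false
      st.1 && !st.2

-- ===== PORT B =====
-- all(a <= b for a, b in zip(number, number[1:]))
def valid1AltNonDec : List Char → Bool
  | [] => true
  | [_] => true
  | a :: b :: rest => decide (a ≤ b) && valid1AltNonDec (b :: rest)

def valid1_alt (number : String) : Bool :=
  let nonDecreasing := valid1AltNonDec number.toList
  let hasDup := (PySem.Set.ofList number.toList).length != number.toList.length
  nonDecreasing && hasDup

-- ===== PRECONDITION & SPEC =====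
def Spec_valid1 (number : String) (out : Bool) : Prop := out = valid1_alt number
instance (number : String) (out : Bool) : Decidable (Spec_valid1 number out) := by unfold Spec_valid1; infer_instance

-- ===== CLAIM (what is proved, stated in full; the proofs are below) =====
def Claim_equal_valid1 : Prop := ∀ (number : String), Dom_valid1 number → Spec_valid1 number (valid1 number)

-- ===== LEMMAS AND PROOFS =====

-- adjacent-duplicate and any-decrease flags, as direct recursions
def pvAdjDup : Char → List Char → Bool
  | _, [] => false
  | p, c :: r => (decide (c = p)) || pvAdjDup c r

def pvAnyDec : Char → List Char → Bool
  | _, [] => false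
  | p, c :: r => decide (p > c) || pvAnyDec c r

theorem valid1Loop_eq (rest : List Char) : ∀ (prev : Char) (d dec : Bool),
    valid1Loop prev rest d dec = (d || pvAdjDup prev rest, dec || pvAnyDec prev rest) := by
  induction rest with
  | nil => intro prev d dec; simp [valid1Loop, pvAdjDup, pvAnyDec]
  | cons c r ih =>
      intro prev d dec
      simp only [valid1Loop, pvAdjDup, pvAnyDec, ih]
      cases d <;> cases dec <;>
        simp [Bool.or_comm]

theorem nonDec_eq (r : List Char) : ∀ c : Char,
    valid1AltNonDec (c :: r) = !(pvAnyDec c r) := by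
  induction r with
  | nil => intro c; simp [valid1AltNonDec, pvAnyDec]
  | cons b r ih =>
      intro c
      simp only [valid1AltNonDec, pvAnyDec, ih, Bool.not_or]
      congr 1
      simp only [gt_iff_lt, ← not_le, decide_not, Bool.not_not]

theorem adjDup_not_nodup (r : List Char) : ∀ c : Char,
    pvAdjDup c r = true → ¬ (c :: r).Nodup := by
  induction r with
  | nil => intro c h; simp [pvAdjDup] at h
  | cons b r ih =>
      intro c h hn
      simp only [pvAdjDup, Bool.or_eq_true, decide_eq_true_eq] at h
      rcases h with h | h
      · subst h; simp [List.nodup_cons] at hn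
      · exact ih b h hn.of_cons

theorem pairwise_of_flags (r : List Char) : ∀ c : Char,
    pvAnyDec c r = false → pvAdjDup c r = false → (c :: r).Pairwise (· < ·) := by
  induction r with
  | nil => intro c _ _; simp
  | cons b r ih =>
      intro c h1 h2
      simp only [pvAnyDec, pvAdjDup, Bool.or_eq_false_iff] at h1 h2
      have hbr := ih b h1.2 h2.2
      have hcb : c < b := by
        have hle : c ≤ b := le_of_not_gt (by simpa [gt_iff_lt] using h1.1)
        have hne : b ≠ c := by simpa using h2.1
        exact lt_of_le_of_ne hle (Ne.symm hne)
      refine List.pairwise_cons.mpr ⟨?_, hbr⟩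
      intro x hx
      rcases List.mem_cons.mp hx with h | h
      · subst h; exact hcb
      · exact hcb.trans ((List.pairwise_cons.mp hbr).1 x h)

theorem nodup_of_flags (r : List Char) (c : Char)
    (h1 : pvAnyDec c r = false) (h2 : pvAdjDup c r = false) : (c :: r).Nodup := by
  exact (pairwise_of_flags r c h1 h2).imp (fun h => ne_of_lt h)

theorem length_ofList_eq_iff (xs : List Char) :
    (PySem.Set.ofList xs).length = xs.length ↔ xs.Nodup := by
  constructor
  · intro h
    have hperm : (PySem.Set.ofList xs).Perm xs.dedup := by
      refine (List.perm_ext_iff_of_nodup (PySem.Set.nodup_ofList xs) xs.nodup_dedup).mpr ?_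
      intro x; simp [PySem.Set.mem_ofList, List.mem_dedup]
    have hlen : xs.dedup.length = xs.length := by
      rw [← hperm.length_eq, h]
    have : xs.dedup = xs := xs.dedup_sublist.eq_of_length hlen
    rw [← this]; exact xs.nodup_dedup
  · intro h
    rw [PySem.Set.ofList_eq_self_of_nodup xs h]

-- ===== VERDICT (by name: the statement is the Claim_ definition above) =====
theorem valid1_spec : Claim_equal_valid1 := by
  intro number _
  unfold Spec_valid1 valid1 valid1_alt
  cases hls : number.toList with
  | nil => simp [valid1AltNonDec, PySem.Set.ofList]
  | cons c r =>
      simp only [valid1Loop_eq, nonDec_eq, Bool.false_or]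
      cases h1 : pvAnyDec c r
      · cases h2 : pvAdjDup c r
        · have hnd := nodup_of_flags r c h1 h2
          have := (length_ofList_eq_iff (c :: r)).mpr hnd
          simp [this]
        · have hnn := adjDup_not_nodup r c h2
          have : (PySem.Set.ofList (c :: r)).length ≠ (c :: r).length := by
            intro hc; exact hnn ((length_ofList_eq_iff (c :: r)).mp hc)
          simpa [bne_iff_ne] using this
      · simp
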